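-- pv_equiv track=rewrite | github.com/dalyosint/AffilExt | src/definition/single_cmd_scheme/affaddr.py | _has_affaddr_block
-- ===== SOURCE A (Python) =====
-- def _has_affaddr_block(parts: list[str]) -> bool:
--     if len(parts) < 3:
--         return False
--
--     started_affaddr_part = False
--     for part in parts[1:]:
--         part = part.lower()
--         if part.startswith(r"\affaddr"):
--             started_affaddr_part = True
--         elif started_affaddr_part:
--             # line is not starting with \affaddr{}, but we already encountered one of those, thus this is not a
--             # block of \affaddr{}
--             return False
--
--     return True
-- ===== SOURCE B (Python) =====
-- def _has_affaddr_block(parts: list[str]) -> bool: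
--     if len(parts) < 3:
--         return False
--     # Walk the tail BACK-TO-FRONT: strip the trailing run of \affaddr parts,
--     # then the block is valid iff no \affaddr part remains before that run.
--     rev = parts[1:][::-1]
--     i = 0
--     while i < len(rev) and rev[i].lower().startswith("\\affaddr"):
--         i += 1
--     return not any(p.lower().startswith("\\affaddr") for p in rev[i:])
-- ===== Notes on version B (the rewrite author's own statement) =====
-- stated objective: alternative
-- what changed: Replaces A's forward flag-tracking early-return loop by a back-to-front traversal: reverse the tail, strip the trailing run of \affaddr parts, and check that no \affaddr part occurs before that run.
import Mathlib
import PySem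

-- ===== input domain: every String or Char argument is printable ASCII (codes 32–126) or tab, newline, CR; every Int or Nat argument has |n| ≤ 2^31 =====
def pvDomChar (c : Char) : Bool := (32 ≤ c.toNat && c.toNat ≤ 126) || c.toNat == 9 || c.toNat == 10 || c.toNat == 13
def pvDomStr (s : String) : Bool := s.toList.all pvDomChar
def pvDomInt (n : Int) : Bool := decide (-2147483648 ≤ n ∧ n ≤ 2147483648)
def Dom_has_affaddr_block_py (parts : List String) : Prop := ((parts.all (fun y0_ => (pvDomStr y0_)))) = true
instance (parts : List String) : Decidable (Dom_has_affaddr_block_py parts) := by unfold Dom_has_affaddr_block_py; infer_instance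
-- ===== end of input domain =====

-- B replaces A's forward flag-tracking early-return loop by a back-to-front pass:
-- strip the trailing run of \affaddr parts from the reversed tail, then check no \affaddr part remains (alternative, same cost).

-- ===== PORT A =====
-- the for-loop over parts[1:] with the started_affaddr_part flag and early return False
def pvAffLoop : List String → Bool → Bool
  | [], _ => true
  | part :: rest, started =>
      let pl := PySem.Str.lower part
      if PySem.Str.startswith pl "\\affaddr" then pvAffLoop rest true
      else if started then false
      else pvAffLoop rest started

def has_affaddr_block_py (parts : List String) : Bool :=
  if parts.length < 3 then false
  else pvAffLoop (PySem.List.slice parts (some 1) none) false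

-- ===== PORT B =====
def pvAff (p : String) : Bool := PySem.Str.startswith (PySem.Str.lower p) "\\affaddr"

def has_affaddr_block_py_alt (parts : List String) : Bool :=
  if parts.length < 3 then false
  else
    let rev := (PySem.List.slice parts (some 1) none).reverse
    -- the while loop strips the leading run of affaddr parts of rev (= trailing run of the tail)
    let rest := rev.dropWhile pvAff
    -- 'not any(...)' over the remainder
    rest.all (fun p => !pvAff p)

-- ===== PRECONDITION & SPEC =====
def Spec_has_affaddr_block_py (parts : List String) (out : Bool) : Prop := out = has_affaddr_block_py_alt parts
instance (parts : List String) (out : Bool) : Decidable (Spec_has_affaddr_block_py parts out) := by unfold Spec_has_affaddr_block_py; infer_instance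

-- ===== CLAIM (what is proved, stated in full; the proofs are below) =====
def Claim_equal_has_affaddr_block_py : Prop := ∀ (parts : List String), Dom_has_affaddr_block_py parts → Spec_has_affaddr_block_py parts (has_affaddr_block_py parts)

-- ===== LEMMAS AND PROOFS =====

-- B's core on a tail list l (before reversal)
def pvB (l : List String) : Bool := (l.reverse.dropWhile pvAff).all (fun p => !pvAff p)

lemma pvAffLoop_cons (p : String) (r : List String) (b : Bool) :
    pvAffLoop (p :: r) b = (if pvAff p then pvAffLoop r true else if b then false else pvAffLoop r b) := rfl

lemma pvAffLoop_true (l : List String) : pvAffLoop l true = l.all pvAff := by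
  induction l with
  | nil => rfl
  | cons p r ih =>
      rw [pvAffLoop_cons]
      by_cases h : pvAff p <;> simp [h, ih]

lemma pvB_of_all (l : List String) (h : l.all pvAff = true) : pvB l = true := by
  unfold pvB
  have : l.reverse.dropWhile pvAff = [] := by
    rw [List.dropWhile_eq_nil_iff]
    intro x hx
    exact (List.all_eq_true.mp h) x (List.mem_reverse.mp hx)
  simp [this]

lemma pvB_cons (p : String) (r : List String) :
    pvB (p :: r) = (if r.all pvAff then true else (!pvAff p && pvB r)) := by
  unfold pvB
  rw [List.reverse_cons, List.dropWhile_append]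
  by_cases hall : r.all pvAff = true
  · have hnil : r.reverse.dropWhile pvAff = [] := by
      rw [List.dropWhile_eq_nil_iff]
      intro x hx
      exact (List.all_eq_true.mp hall) x (List.mem_reverse.mp hx)
    simp only [hnil, hall, if_true, List.nil_append]
    by_cases hp : pvAff p <;> simp [List.dropWhile, hp]
  · have hne : r.reverse.dropWhile pvAff ≠ [] := by
      intro hc
      apply hall
      rw [List.all_eq_true]
      intro x hx
      exact List.dropWhile_eq_nil_iff.mp hc x (List.mem_reverse.mpr hx)
    have hEmp : (r.reverse.dropWhile pvAff).isEmpty = false := by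
      simp [hne]
    rw [hEmp, if_neg hall]
    simp [Bool.and_comm]

lemma pvAffLoop_false (l : List String) : pvAffLoop l false = pvB l := by
  induction l with
  | nil => rfl
  | cons p r ih =>
      rw [pvAffLoop_cons, pvB_cons]
      by_cases hp : pvAff p
      · rw [if_pos hp, pvAffLoop_true]
        by_cases hall : r.all pvAff = true <;> simp [hall, hp]
      · rw [if_neg hp, if_neg (by simp)]
        by_cases hall : r.all pvAff = true
        · simp [hall, ih, pvB_of_all r hall]
        · simp [hall, hp, ih]

-- ===== VERDICT (by name: the statement is the Claim_ definition above) =====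
theorem has_affaddr_block_py_spec : Claim_equal_has_affaddr_block_py := by
  intro parts _
  unfold Spec_has_affaddr_block_py has_affaddr_block_py has_affaddr_block_py_alt
  by_cases h : parts.length < 3
  · simp [h]
  · simp only [h, if_false]
    exact (pvAffLoop_false _).trans rfl
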